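-- pv_equiv track=rewrite | github.com/abo-bahr-alqershi/erp_pro | extract_relationships_from_sql.py | format_field_names
-- ===== SOURCE A (Python) =====
-- def format_field_names(table, field_names, field_name_map, table_name_map):
--     if not field_names:
--         return '"" []'
--     fields = [f.strip().upper() for f in field_names.split(",")]
--     result = []
--     table_new = table_name_map.get(table, None)
--     for f in fields:
--         new = field_name_map.get(table, {}).get(f)
--         if new is None and table_new:
--             new = field_name_map.get(table_new, {}).get(f)
--         if new is None:
--             new = "؟؟؟"
--         result.append(f'"{f}" [{new}]')
--     return ', '.join(result)
-- ===== SOURCE B (Python) =====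
-- def format_field_names(table, field_names, field_name_map, table_name_map):
--     if not field_names:
--         return '"" []'
--     table_new = table_name_map.get(table)
--     merged = dict(field_name_map.get(table_new, {}) if table_new else {})
--     merged.update(field_name_map.get(table, {}))
--
--     def fmt(raw):
--         f = raw.strip().upper()
--         return f'"{f}" [{merged.get(f, "؟؟؟")}]'
--
--     return ', '.join(fmt(raw) for raw in field_names.split(","))
-- ===== Notes on version B (the rewrite author's own statement) =====
-- stated objective: simpler
-- what changed: B builds one merged lookup dict before the loop (the table layer overriding the table_new layer, added only when table_new is truthy), so each field needs a single .get with a default instead of A's per-field two-stage conditional lookup chain.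
import Mathlib
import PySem

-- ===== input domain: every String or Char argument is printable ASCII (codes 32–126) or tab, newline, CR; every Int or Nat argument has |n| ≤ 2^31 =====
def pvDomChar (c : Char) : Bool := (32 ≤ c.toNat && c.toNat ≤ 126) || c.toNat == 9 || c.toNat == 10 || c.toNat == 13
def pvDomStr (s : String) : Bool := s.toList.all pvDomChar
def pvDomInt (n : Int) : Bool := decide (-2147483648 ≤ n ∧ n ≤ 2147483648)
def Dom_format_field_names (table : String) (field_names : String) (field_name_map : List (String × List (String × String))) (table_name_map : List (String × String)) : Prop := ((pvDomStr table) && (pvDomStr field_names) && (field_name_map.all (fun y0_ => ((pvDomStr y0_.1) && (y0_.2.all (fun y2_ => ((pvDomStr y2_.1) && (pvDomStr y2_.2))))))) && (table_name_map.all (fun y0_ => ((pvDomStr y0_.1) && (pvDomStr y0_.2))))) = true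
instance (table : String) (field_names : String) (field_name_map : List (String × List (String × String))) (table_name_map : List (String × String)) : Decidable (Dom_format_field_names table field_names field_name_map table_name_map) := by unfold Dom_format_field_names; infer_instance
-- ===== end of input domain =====

-- B replaces A's per-field two-stage dict lookup by one merged lookup dict (table layer
-- over the table_new layer) built once before the loop — objective: simpler.

-- ===== PORT A =====
def format_field_names (table : String) (field_names : String) (field_name_map : List (String × List (String × String))) (table_name_map : List (String × String)) : String :=
  if field_names == "" then "\"\" []"
  else
    let fields := ((PySem.Str.split? field_names ",").getD []).map
      (fun f => PySem.Str.upper (PySem.Str.strip f))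
    let table_new := (PySem.Dict.mk table_name_map).get? table
    let result := fields.foldl (fun acc f =>
      let new1 := (PySem.Dict.mk ((PySem.Dict.mk field_name_map).getD table [])).get? f
      let new2 :=
        match new1 with
        | some v => some v
        | none =>
          match table_new with
          | some t =>
            if t == "" then none
            else (PySem.Dict.mk ((PySem.Dict.mk field_name_map).getD t [])).get? f
          | none => none
      acc ++ ["\"" ++ f ++ "\" [" ++ new2.getD "؟؟؟" ++ "]"]) ([] : List String)
    PySem.Str.join ", " result

-- ===== PORT B =====
def format_field_names_alt (table : String) (field_names : String) (field_name_map : List (String × List (String × String))) (table_name_map : List (String × String)) : String :=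
  if field_names == "" then "\"\" []"
  else
    let table_new := (PySem.Dict.mk table_name_map).get? table
    let base : PySem.Dict String String :=
      match table_new with
      | some t =>
        if t == "" then PySem.Dict.mk []
        else PySem.Dict.mk ((PySem.Dict.mk field_name_map).getD t [])
      | none => PySem.Dict.mk []
    let merged := ((PySem.Dict.mk field_name_map).getD table []).foldl
      (fun d kv => d.insert kv.1 kv.2) base
    let parts := ((PySem.Str.split? field_names ",").getD []).map (fun raw =>
      let f := PySem.Str.upper (PySem.Str.strip raw)
      "\"" ++ f ++ "\" [" ++ merged.getD f "؟؟؟" ++ "]")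
    PySem.Str.join ", " parts

-- ===== PRECONDITION & SPEC =====
-- Pre_ excludes association lists whose field map for `table` repeats a key: a Python dict
-- cannot hold duplicate keys, so such Lean inputs have no Python counterpart, and on them
-- A's first-match lookup and B's overwrite-merge order are both accidental.
def Pre_format_field_names (table : String) (field_names : String) (field_name_map : List (String × List (String × String))) (table_name_map : List (String × String)) : Prop :=
  ((((PySem.Dict.mk field_name_map).getD table []).map Prod.fst).Nodup)
instance (table : String) (field_names : String) (field_name_map : List (String × List (String × String))) (table_name_map : List (String × String)) : Decidable (Pre_format_field_names table field_names field_name_map table_name_map) := by unfold Pre_format_field_names; infer_instance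

def pvWitness_format_field_names : String × String × (List (String × List (String × String))) × (List (String × String)) :=
  ("t", "a, b", [("t", [("A", "x")])], [("t", "u")])

def Spec_format_field_names (table : String) (field_names : String) (field_name_map : List (String × List (String × String))) (table_name_map : List (String × String)) (out : String) : Prop := out = format_field_names_alt table field_names field_name_map table_name_map
instance (table : String) (field_names : String) (field_name_map : List (String × List (String × String))) (table_name_map : List (String × String)) (out : String) : Decidable (Spec_format_field_names table field_names field_name_map table_name_map out) := by unfold Spec_format_field_names; infer_instance

-- ===== CLAIM (what is proved, stated in full; the proofs are below) =====
def Claim_equal_format_field_names : Prop := ∀ (table : String) (field_names : String) (field_name_map : List (String × List (String × String))) (table_name_map : List (String × String)), Dom_format_field_names table field_names field_name_map table_name_map → Pre_format_field_names table field_names field_name_map table_name_map → Spec_format_field_names table field_names field_name_map table_name_map (format_field_names table field_names field_name_map table_name_map)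

-- ===== LEMMAS AND PROOFS =====

-- Looking up in the insert-fold of a duplicate-free layer l over a base dict is: l's value
-- if the key is in l, else the base's value.
theorem get?_foldl_insert (l : List (String × String)) (d : PySem.Dict String String) (f : String)
    (h : (l.map Prod.fst).Nodup) :
    (l.foldl (fun d kv => d.insert kv.1 kv.2) d).get? f =
      ((PySem.Dict.mk l).get? f).or (d.get? f) := by
  induction l generalizing d with
  | nil => simp [PySem.Dict.get?]
  | cons kv t ih =>
    simp only [List.map_cons, List.nodup_cons] at h
    simp only [List.foldl_cons]
    rw [ih _ h.2, PySem.Dict.get?_mk_cons]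
    by_cases hk : kv.1 = f
    · subst hk
      have ht : (PySem.Dict.mk t).get? kv.1 = none := by
        exact (PySem.Dict.get?_eq_none_iff_not_mem_keys _ _).mpr (by
          simpa [PySem.Dict.keys_mk] using h.1)
      simp [ht, PySem.Dict.get?_insert_self]
    · rw [PySem.Dict.get?_insert_of_ne _ _ (Ne.symm hk)]
      simp [hk]

-- ===== VERDICT (by name: the statement is the Claim_ definition above) =====
theorem format_field_names_spec : Claim_equal_format_field_names := by
  intro table field_names field_name_map table_name_map _ hpre
  unfold Spec_format_field_names format_field_names format_field_names_alt
  by_cases h0 : field_names == ""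
  · simp [h0]
  · simp only [h0, if_false]
    rw [PySem.List.foldl_append_singleton_eq_map, List.nil_append, List.map_map]
    refine congrArg (PySem.Str.join ", ") (List.map_congr_left ?_)
    intro raw _
    simp only [Function.comp]
    apply congrArg (fun s => "\"" ++ PySem.Str.upper (PySem.Str.strip raw) ++ "\" [" ++ s ++ "]")
    set f := PySem.Str.upper (PySem.Str.strip raw) with hf
    unfold Pre_format_field_names at hpre
    simp only [PySem.Dict.getD] at hpre ⊢
    rw [get?_foldl_insert _ _ _ hpre]
    cases hv : (PySem.Dict.mk (((PySem.Dict.mk field_name_map).get? table).getD [])).get? f with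
    | some v => simp [hv, Option.or]
    | none =>
      simp only [hv, Option.or]
      cases htn : (PySem.Dict.mk table_name_map).get? table with
      | none => simp [PySem.Dict.get?]
      | some t =>
        by_cases ht : t == ""
        · simp [ht, PySem.Dict.get?]
        · simp [ht, PySem.Dict.getD]
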